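-- pv_equiv track=rewrite | github.com/EigenSolver/QAOA_TSP | lib/graph_converter.py | complete_graph_edge_coloring_cluster
-- ===== SOURCE A (Python) =====
-- def complete_graph_edge_coloring_cluster(n):
--     '''
--     from Vizing's theorem in graph theory
--
--     for a complete graph, the degree of each node is n-1
--     there are n(n-1)/2 edges in the graph
--
--     if n is odd, there are n edge-coloring clusters, with (n-1)/2 edges in each cluster
--     if n is even, there are n-1 edge-coloring clusters, with n/2 edges in each cluster
--
--     give a complete graph with n vitices, return a cluster contains
--
--     Args:
--         n(int): number of vertices in the graph
--     Return:
--         clusters(list): list of list(cluster) contains edges(tuple of 2-node) in the cluster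
--     >>> complete_graph_edge_coloring_cluster(5)
--     [[(0, 1), (4, 2)], [(1, 2), (0, 3)], [(2, 3), (1, 4)], [(3, 4), (2, 0)], [(4, 0), (3, 1)]]
--     >>> complete_graph_edge_coloring_cluster(6)
--     [[(0, 1), (4, 2), (5, 3)], [(1, 2), (0, 3), (5, 4)], [(2, 3), (1, 4), (5, 0)], [(3, 4), (2, 0), (5, 1)], [(4, 0), (3, 1), (5, 2)]]
--     '''
--
--     clusters = []
--     if n % 2 == 1:
--         for i in range(n):
--             edges = []
--             for j in range((n-1)//2):
--                 edges.append(((i-j) % n, (i+1+j) % n))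
--             clusters.append(edges)
--     elif n % 2 == 0:
--         clusters = complete_graph_edge_coloring_cluster(n-1)
--         for i in range(n-1):
--             clusters[i].append((n-1, (i+n//2) % (n-1)))
--     return clusters
-- ===== SOURCE B (Python) =====
-- def complete_graph_edge_coloring_cluster(n):
--     # Classify-and-place instead of generate-per-cluster: preallocate the table of
--     # clusters, then enumerate every edge {a,b} of the complete graph on the m circle
--     # vertices ONCE and scatter it into its color class c (edge-sum a+b determines the
--     # color: 2c+1 = a+b mod m, m odd) at its slot j, orienting the tuple from the slot.
--     m = n if n % 2 == 1 else n - 1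
--     half = (m - 1) // 2
--     size = half if n % 2 == 1 else half + 1
--     clusters = [[(0, 0)] * size for _ in range(m)]
--     inv2 = (m + 1) // 2  # inverse of 2 modulo m (m odd)
--     for a in range(m):
--         for b in range(a + 1, m):
--             c = ((a + b - 1) * inv2) % m
--             j = min((c - a) % m, (c - b) % m)
--             first = (c - j) % m
--             clusters[c][j] = (first, b if first == a else a)
--     if n % 2 == 0:
--         for i in range(m):
--             clusters[i][half] = (n - 1, (i + n // 2) % m)
--     return clusters
-- ===== Notes on version B (the rewrite author's own statement) =====
-- stated objective: alternative
-- what changed: Instead of generating each color cluster's edges in turn (A: per-cluster modular formulas plus a recursive call and mutation loop for even n), B preallocates the cluster table and enumerates every edge {a,b} of the complete graph exactly once, computing each edge's color class from its endpoint sum (2c+1 = a+b mod m, inverting 2 modulo the odd m) and its slot, and scatter-writes it into place.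
import Mathlib
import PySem

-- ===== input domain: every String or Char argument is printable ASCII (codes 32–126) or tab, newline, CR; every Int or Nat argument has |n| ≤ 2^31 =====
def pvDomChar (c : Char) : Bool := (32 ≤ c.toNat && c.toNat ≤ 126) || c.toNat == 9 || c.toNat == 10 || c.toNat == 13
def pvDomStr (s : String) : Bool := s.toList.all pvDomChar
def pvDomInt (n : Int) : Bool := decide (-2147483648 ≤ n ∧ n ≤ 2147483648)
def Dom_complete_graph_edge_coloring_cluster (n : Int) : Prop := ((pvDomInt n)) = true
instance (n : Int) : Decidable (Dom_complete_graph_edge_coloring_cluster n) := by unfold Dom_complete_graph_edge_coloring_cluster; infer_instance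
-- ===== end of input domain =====

-- B replaces A's generate-per-cluster recursion by a classify-and-place pass: it
-- preallocates the cluster table and scatters every edge of the complete graph into the
-- color class determined by its endpoint sum (objective: alternative; identical output).

-- ===== PORT A =====
-- A's inner 'for j' append loop building one row, extracted as a helper
def pvRowA (m i : Int) : List (Int × Int) :=
  (PySem.List.pyRange 0 (PySem.Int.floordiv (m - 1) 2)).map
    (fun j => (PySem.Int.mod (i - j) m, PySem.Int.mod (i + 1 + j) m))

-- literal port of A; the even branch's 'clusters[i].append(…)' loop (each index written exactly
-- once, in order, over the whole list) is ported as a map over enumerate(clusters)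
def complete_graph_edge_coloring_cluster (n : Int) : List (List (Int × Int)) :=
  if PySem.Int.mod n 2 = 1 then
    (PySem.List.pyRange 0 n).map (pvRowA n)
  else if PySem.Int.mod n 2 = 0 then
    (PySem.List.enumerate (complete_graph_edge_coloring_cluster (n - 1))).map
      (fun p => p.2 ++ [(n - 1, PySem.Int.mod (p.1 + PySem.Int.floordiv n 2) (n - 1))])
  else []
termination_by (if PySem.Int.mod n 2 = 0 then 1 else 0 : Nat)
decreasing_by
  rename_i _ h2
  have ha : PySem.Int.mod (n - 1) 2 ≠ 0 := by
    rw [PySem.Int.mod_eq_emod_of_pos (by norm_num)] at h2 ⊢; omega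
  rw [if_neg ha, if_pos h2]; norm_num

-- ===== PORT B =====
-- 'clusters[c][j] = v' (in-place assignment on the nested lists; indices here are always
-- nonnegative and in range, where pySetD/pyGetD are exact)
def pvSet2 (T : List (List (Int × Int))) (c j : Int) (v : Int × Int) :
    List (List (Int × Int)) :=
  PySem.List.pySetD T c (PySem.List.pySetD (PySem.List.pyGetD T c []) j v)

-- literal port of Source B; '[(0, 0)] * size' is List.replicate size.toNat (empty for size ≤ 0,
-- exactly Python's list repetition)
def complete_graph_edge_coloring_cluster_alt (n : Int) : List (List (Int × Int)) :=
  let m : Int := if PySem.Int.mod n 2 == 1 then n else n - 1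
  let half : Int := PySem.Int.floordiv (m - 1) 2
  let size : Int := if PySem.Int.mod n 2 == 1 then half else half + 1
  let clusters0 : List (List (Int × Int)) :=
    (PySem.List.pyRange 0 m).map (fun _ => List.replicate size.toNat ((0 : Int), (0 : Int)))
  let inv2 : Int := PySem.Int.floordiv (m + 1) 2
  let clusters1 :=
    (PySem.List.pyRange 0 m).foldl (fun T a =>
      (PySem.List.pyRange (a + 1) m).foldl (fun T b =>
        let c := PySem.Int.mod ((a + b - 1) * inv2) m
        let j := min (PySem.Int.mod (c - a) m) (PySem.Int.mod (c - b) m)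
        let first := PySem.Int.mod (c - j) m
        pvSet2 T c j (first, if first == a then b else a)) T) clusters0
  if PySem.Int.mod n 2 == 0 then
    (PySem.List.pyRange 0 m).foldl (fun T i =>
      pvSet2 T i half (n - 1, PySem.Int.mod (i + PySem.Int.floordiv n 2) m)) clusters1
  else clusters1

-- ===== PRECONDITION & SPEC =====
def Spec_complete_graph_edge_coloring_cluster (n : Int) (out : List (List (Int × Int))) : Prop := out = complete_graph_edge_coloring_cluster_alt n
instance (n : Int) (out : List (List (Int × Int))) : Decidable (Spec_complete_graph_edge_coloring_cluster n out) := by unfold Spec_complete_graph_edge_coloring_cluster; infer_instance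

-- ===== CLAIM (what is proved, stated in full; the proofs are below) =====
def Claim_equal_complete_graph_edge_coloring_cluster : Prop := ∀ (n : Int), Dom_complete_graph_edge_coloring_cluster n → Spec_complete_graph_edge_coloring_cluster n (complete_graph_edge_coloring_cluster n)

-- ===== LEMMAS AND PROOFS =====

-- the common value both programs compute, row by row
def pvTarget (n : Int) : List (List (Int × Int)) :=
  if PySem.Int.mod n 2 = 1 then (PySem.List.pyRange 0 n).map (pvRowA n)
  else (PySem.List.pyRange 0 (n - 1)).map (fun i =>
    pvRowA (n - 1) i ++ [(n - 1, PySem.Int.mod (i + PySem.Int.floordiv n 2) (n - 1))])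

theorem pvA_eq_target (n : Int) : complete_graph_edge_coloring_cluster n = pvTarget n := by
  unfold pvTarget
  rcases PySem.Int.mod_two_eq n with h | h
  · -- even n
    rw [if_neg (by rw [h]; decide)]
    rw [complete_graph_edge_coloring_cluster, if_neg (by rw [h]; decide), if_pos h]
    have h1 : PySem.Int.mod (n - 1) 2 = 1 := by
      rw [PySem.Int.mod_eq_emod_of_pos (by norm_num)] at h ⊢; omega
    rw [complete_graph_edge_coloring_cluster, if_pos h1]
    rw [PySem.List.enumerate_eq_map_pyRange _ ([] : List (Int × Int)), List.map_map]
    have hlen : PySem.List.len ((PySem.List.pyRange 0 (n-1)).map (pvRowA (n-1)))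
        = ((n - 1 - 0).toNat : Int) := by
      simp [PySem.List.len_eq, PySem.List.length_pyRange_one]
    rcases (em (n ≤ 0)).imp id (fun hh => by omega : ¬ n ≤ 0 → 0 < n) with hn | hn
    · rw [PySem.List.pyRange_one_eq_nil (by omega : n - 1 ≤ 0)]
      simp [PySem.List.len_eq]
    · rw [hlen, (by omega : ((n - 1 - 0).toNat : Int) = n - 1)]
      apply List.map_congr_left
      intro j hj
      rw [PySem.List.mem_pyRange_one] at hj
      simp only [Function.comp]
      rw [PySem.List.pyGetD_map_pyRange_of_nonneg _ _ _ _ hj.1 hj.2]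
  · -- odd n
    rw [if_pos h, complete_graph_edge_coloring_cluster, if_pos h]

-- ---- modular arithmetic helpers ----
theorem pvModEq_emod (x m : Int) : x % m ≡ x [ZMOD m] := Int.emod_emod_of_dvd x dvd_rfl

theorem pvEq_of_modeq {x y m : Int} (h : x ≡ y [ZMOD m]) (hx0 : 0 ≤ x) (hx1 : x < m)
    (hy0 : 0 ≤ y) (hy1 : y < m) : x = y := by
  have h2 : x % m = y % m := h
  rwa [Int.emod_eq_of_lt hx0 hx1, Int.emod_eq_of_lt hy0 hy1] at h2

-- ---- table access and pvSet2 characterization ----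
def pvAt (T : List (List (Int × Int))) (c j : Nat) : Int × Int := (T.getD c []).getD j (0, 0)

theorem pvSet2_eq_set {T : List (List (Int × Int))} {c j : Int} {v : Int × Int}
    (hc0 : 0 ≤ c) (hc1 : c.toNat < T.length) (hj0 : 0 ≤ j)
    (_hj1 : j.toNat < (T[c.toNat]'hc1).length) :
    pvSet2 T c j v = T.set c.toNat ((T[c.toNat]'hc1).set j.toNat v) := by
  unfold pvSet2
  rw [PySem.List.pyGetD_eq_getElem _ _ hc0 (by omega),
      PySem.List.pySetD_of_nonneg _ _ hj0, PySem.List.pySetD_of_nonneg _ _ hc0]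

theorem pvGetD_set {α : Type} (l : List α) (i c : Nat) (a : α) (d : α) :
    (l.set i a).getD c d = if i = c ∧ c < l.length then a else l.getD c d := by
  by_cases hc : c < l.length
  · rw [List.getD_eq_getElem _ _ (by simpa using hc), List.getElem_set,
        List.getD_eq_getElem _ _ hc]
    split_ifs with h h2 <;> simp_all
  · rw [List.getD_eq_default _ _ (by simpa using not_lt.mp hc),
        List.getD_eq_default _ _ (not_lt.mp hc), if_neg (by omega)]

-- one write: shape kept, entry (c,j) becomes v, other entries unchanged
theorem pvSet2_shape {m size : Int} {T : List (List (Int × Int))} {c j : Int} {v : Int × Int}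
    (hT : T.length = m.toNat) (hTr : ∀ i (h : i < T.length), (T[i]).length = size.toNat)
    (hc0 : 0 ≤ c) (hc1 : c < m) (hj0 : 0 ≤ j) (hj1 : j < size) :
    (pvSet2 T c j v).length = m.toNat ∧
    (∀ i (h : i < (pvSet2 T c j v).length), ((pvSet2 T c j v)[i]).length = size.toNat) ∧
    (∀ c' j' : Nat, c' < m.toNat → j' < size.toNat →
      pvAt (pvSet2 T c j v) c' j' = if c' = c.toNat ∧ j' = j.toNat then v else pvAt T c' j') := by
  have hcl : c.toNat < T.length := by omega
  have hjl : j.toNat < (T[c.toNat]'hcl).length := by rw [hTr c.toNat hcl]; omega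
  rw [pvSet2_eq_set hc0 hcl hj0 hjl]
  refine ⟨by simp [hT], ?_, ?_⟩
  · intro i h
    rw [List.getElem_set]
    split_ifs with hi
    · rw [List.length_set]; exact hTr c.toNat hcl
    · exact hTr i (by simpa using h)
  · intro c' j' hc' hj'
    have hc'T : c' < T.length := by omega
    unfold pvAt
    rw [pvGetD_set]
    by_cases h1 : c.toNat = c' ∧ c' < T.length
    · rw [if_pos h1, pvGetD_set]
      have hrl : j.toNat < (T[c.toNat]'hcl).length := hjl
      by_cases h2 : j.toNat = j' ∧ j' < (T[c.toNat]'hcl).length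
      · rw [if_pos h2, if_pos ⟨h1.1.symm, h2.1.symm⟩]
      · have hj'l : j' < (T[c.toNat]'hcl).length := by rw [hTr _ hcl]; omega
        rw [if_neg h2, if_neg (by rintro ⟨ha, hb⟩; exact h2 ⟨by omega, hj'l⟩)]
        have : c.toNat = c' := h1.1
        subst this
        rw [List.getD_eq_getElem _ _ hc'T]
    · rw [if_neg h1, if_neg (by rintro ⟨ha, hb⟩; exact h1 ⟨ha.symm, hc'T⟩)]

-- ---- generic scatter loop: every step writes the slot value g at a valid slot ----
theorem pvFoldWrite {β : Type} (m size : Int) (g : Int → Int → Int × Int)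
    (sc sj : β → Int) (val : β → Int × Int) (L : List β)
    (hs : ∀ x ∈ L, 0 ≤ sc x ∧ sc x < m ∧ 0 ≤ sj x ∧ sj x < size ∧ val x = g (sc x) (sj x)) :
    ∀ (T : List (List (Int × Int))), T.length = m.toNat →
      (∀ i (h : i < T.length), (T[i]).length = size.toNat) →
      (L.foldl (fun T x => pvSet2 T (sc x) (sj x) (val x)) T).length = m.toNat ∧
      (∀ i (h : i < (L.foldl (fun T x => pvSet2 T (sc x) (sj x) (val x)) T).length),
        ((L.foldl (fun T x => pvSet2 T (sc x) (sj x) (val x)) T)[i]).length = size.toNat) ∧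
      ∀ (c j : Int), 0 ≤ c → c < m → 0 ≤ j → j < size →
        pvAt (L.foldl (fun T x => pvSet2 T (sc x) (sj x) (val x)) T) c.toNat j.toNat =
          if ∃ x ∈ L, sc x = c ∧ sj x = j then g c j else pvAt T c.toNat j.toNat := by
  induction L with
  | nil => intro T hT hTr; exact ⟨hT, hTr, fun c j _ _ _ _ => by simp⟩
  | cons x L ih =>
    intro T hT hTr
    obtain ⟨hx1, hx2, hx3, hx4, hx5⟩ := hs x (by simp)
    obtain ⟨s1, s2, s3⟩ := pvSet2_shape (v := val x) hT hTr hx1 hx2 hx3 hx4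
    obtain ⟨r1, r2, r3⟩ := ih (fun y hy => hs y (by simp [hy])) _ s1 s2
    refine ⟨r1, r2, ?_⟩
    intro c j hc0 hc1 hj0 hj1
    rw [List.foldl_cons, r3 c j hc0 hc1 hj0 hj1,
        s3 c.toNat j.toNat (by omega) (by omega)]
    by_cases hhd : sc x = c ∧ sj x = j
    · have : c.toNat = (sc x).toNat ∧ j.toNat = (sj x).toNat := by omega
      by_cases htl : ∃ y ∈ L, sc y = c ∧ sj y = j
      · simp [htl, hhd]
      · simp only [if_neg htl, if_pos this]
        rw [if_pos (by simp [hhd]), hx5, hhd.1, hhd.2]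
    · have hne : ¬ (c.toNat = (sc x).toNat ∧ j.toNat = (sj x).toNat) := by omega
      simp only [if_neg hne]
      by_cases htl : ∃ y ∈ L, sc y = c ∧ sj y = j
      · rw [if_pos htl, if_pos (by obtain ⟨y, hy, hyy⟩ := htl; exact ⟨y, by simp [hy], hyy⟩)]
      · rw [if_neg htl, if_neg (by rintro ⟨y, hy, hyy⟩; rcases (by simpa using hy) with h | h
                                   exacts [hhd (h ▸ hyy), htl ⟨y, h, hyy⟩])]

-- x % m equals y when x ≡ y and y is the canonical representative
theorem pvEmod_eq {m y : Int} (hm : 0 < m) (x : Int) (h : x ≡ y [ZMOD m])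
    (hy0 : 0 ≤ y) (hy1 : y < m) : x % m = y :=
  pvEq_of_modeq ((pvModEq_emod x m).trans h) (Int.emod_nonneg _ (by omega))
    (Int.emod_lt_of_pos _ hm) hy0 hy1

theorem pvMsucc_modeq (m : Int) : m + 1 ≡ 1 [ZMOD m] :=
  Int.modEq_iff_dvd.mpr ⟨-1, by ring⟩

-- each edge (a,b) of the complete graph on [0,m) lands at a valid slot (c,j), j below
-- (m-1)/2, and its stored tuple is exactly the slot's row value
theorem pvEdge (m a b c u v j : Int) (hm : 0 < m) (hodd : m % 2 = 1)
    (ha : 0 ≤ a) (hab : a < b) (hb : b < m)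
    (hc : c = ((a + b - 1) * ((m + 1) / 2)) % m)
    (hu : u = (c - a) % m) (hv : v = (c - b) % m) (hj : j = min u v) :
    0 ≤ c ∧ c < m ∧ 0 ≤ j ∧ 2 * j < m - 1 ∧
    ((c - j) % m, if ((c - j) % m == a) then b else a) = ((c - j) % m, (c + 1 + j) % m) := by
  have hmne : m ≠ 0 := by omega
  have hcb : 0 ≤ c ∧ c < m := by
    subst hc; exact ⟨Int.emod_nonneg _ hmne, Int.emod_lt_of_pos _ hm⟩
  have h2inv : 2 * ((m + 1) / 2) = m + 1 := by omega
  have h2c : 2 * c ≡ a + b - 1 [ZMOD m] := by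
    have e1 : 2 * ((a + b - 1) * ((m + 1) / 2)) = (a + b - 1) * (m + 1) := by
      rw [show (a + b - 1) * (m + 1) = (a + b - 1) * (2 * ((m + 1) / 2)) from by rw [h2inv]]
      ring
    calc 2 * c ≡ 2 * ((a + b - 1) * ((m + 1) / 2)) [ZMOD m] := by
            subst hc; exact (pvModEq_emod _ m).mul_left 2
      _ = (a + b - 1) * (m + 1) := e1
      _ ≡ (a + b - 1) * 1 [ZMOD m] := Int.ModEq.mul_left _ (pvMsucc_modeq m)
      _ = a + b - 1 := by ring
  have hum : u ≡ c - a [ZMOD m] := by subst hu; exact pvModEq_emod _ _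
  have hvm : v ≡ c - b [ZMOD m] := by subst hv; exact pvModEq_emod _ _
  have hub : 0 ≤ u ∧ u < m := by subst hu; exact ⟨Int.emod_nonneg _ hmne, Int.emod_lt_of_pos _ hm⟩
  have hvb : 0 ≤ v ∧ v < m := by subst hv; exact ⟨Int.emod_nonneg _ hmne, Int.emod_lt_of_pos _ hm⟩
  have hsum : u + v = m - 1 := by
    have hmod : (u + v) % m = m - 1 := by
      refine pvEmod_eq hm _ ?_ (by omega) (by omega)
      calc u + v ≡ (c - a) + (c - b) [ZMOD m] := hum.add hvm
        _ = 2 * c - (a + b) := by ring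
        _ ≡ (a + b - 1) - (a + b) [ZMOD m] := h2c.sub (Int.ModEq.refl _)
        _ = -1 := by ring
        _ ≡ m - 1 [ZMOD m] := Int.modEq_iff_dvd.mpr ⟨1, by ring⟩
    by_cases hlt : u + v < m
    · rw [Int.emod_eq_of_lt (by omega) hlt] at hmod; exact hmod
    · exfalso
      have h2 : (u + v - m) % m = m - 1 := by
        rw [Int.sub_emod_right]; exact hmod
      rw [Int.emod_eq_of_lt (by omega) (by omega)] at h2
      omega
  have hfu : (c - u) % m = a := by
    refine pvEmod_eq hm _ ?_ ha (by omega)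
    calc c - u ≡ c - (c - a) [ZMOD m] := (Int.ModEq.refl c).sub hum
      _ = a := by ring
  have hfv : (c - v) % m = b := by
    refine pvEmod_eq hm _ ?_ (by omega) hb
    calc c - v ≡ c - (c - b) [ZMOD m] := (Int.ModEq.refl c).sub hvm
      _ = b := by ring
  have hne : u ≠ v := by
    intro he; rw [he] at hfu; rw [hfu] at hfv; omega
  refine ⟨hcb.1, hcb.2, by omega, by omega, ?_⟩
  rcases le_or_gt u v with hle | hgt
  · have hju : j = u := by omega
    rw [hju, hfu, if_pos (by simp)]
    have : (c + 1 + u) % m = b := by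
      refine pvEmod_eq hm _ ?_ (by omega) hb
      calc c + 1 + u ≡ c + 1 + (c - a) [ZMOD m] := Int.ModEq.add_left _ hum
        _ = (2 * c) + 1 - a := by ring
        _ ≡ (a + b - 1) + 1 - a [ZMOD m] := by
            exact ((h2c.add (Int.ModEq.refl 1)).sub (Int.ModEq.refl a))
        _ = b := by ring
    rw [this]
  · have hjv : j = v := by omega
    rw [hjv, hfv, if_neg (by simp; omega)]
    have : (c + 1 + v) % m = a := by
      refine pvEmod_eq hm _ ?_ ha (by omega)
      calc c + 1 + v ≡ c + 1 + (c - b) [ZMOD m] := Int.ModEq.add_left _ hvm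
        _ = (2 * c) + 1 - b := by ring
        _ ≡ (a + b - 1) + 1 - b [ZMOD m] := by
            exact ((h2c.add (Int.ModEq.refl 1)).sub (Int.ModEq.refl b))
        _ = a := by ring
    rw [this]

-- every slot (c', j') with j' below (m-1)/2 is hit by exactly the edge it encodes
theorem pvCover (m c' j' : Int) (hm : 0 < m) (hodd : m % 2 = 1)
    (hc0 : 0 ≤ c') (hc1 : c' < m) (hj0 : 0 ≤ j') (hj1 : 2 * j' < m - 1) :
    ∃ a b : Int, 0 ≤ a ∧ a < b ∧ b < m ∧
      ((a + b - 1) * ((m + 1) / 2)) % m = c' ∧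
      min ((((a + b - 1) * ((m + 1) / 2)) % m - a) % m)
          ((((a + b - 1) * ((m + 1) / 2)) % m - b) % m) = j' := by
  have hmne : m ≠ 0 := by omega
  have h2inv : 2 * ((m + 1) / 2) = m + 1 := by omega
  set a0 := (c' - j') % m with ha0
  set b0 := (c' + 1 + j') % m with hb0
  have ha0m : a0 ≡ c' - j' [ZMOD m] := pvModEq_emod _ _
  have hb0m : b0 ≡ c' + 1 + j' [ZMOD m] := pvModEq_emod _ _
  have ha0b : 0 ≤ a0 ∧ a0 < m := ⟨Int.emod_nonneg _ hmne, Int.emod_lt_of_pos _ hm⟩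
  have hb0b : 0 ≤ b0 ∧ b0 < m := ⟨Int.emod_nonneg _ hmne, Int.emod_lt_of_pos _ hm⟩
  have hne : a0 ≠ b0 := by
    intro he
    have h' : (c' - j') ≡ (c' + 1 + j') [ZMOD m] := ha0m.symm.trans (by rw [he]; exact hb0m)
    have : m ∣ (c' + 1 + j') - (c' - j') := Int.modEq_iff_dvd.mp h'
    have := Int.le_of_dvd (by omega) this
    omega
  have hsum : ∀ x y : Int, x = min a0 b0 → y = max a0 b0 → x + y = a0 + b0 := by omega
  have hcolor : ((a0 + b0 - 1) * ((m + 1) / 2)) % m = c' := by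
    refine pvEmod_eq hm _ ?_ hc0 hc1
    calc (a0 + b0 - 1) * ((m + 1) / 2)
        ≡ ((c' - j') + (c' + 1 + j') - 1) * ((m + 1) / 2) [ZMOD m] :=
          (ha0m.add hb0m).sub_right 1 |>.mul_right _
      _ = c' * (2 * ((m + 1) / 2)) := by ring
      _ = c' * (m + 1) := by rw [h2inv]
      _ ≡ c' * 1 [ZMOD m] := Int.ModEq.mul_left _ (pvMsucc_modeq m)
      _ = c' := by ring
  have hca0 : (c' - a0) % m = j' := by
    refine pvEmod_eq hm _ ?_ hj0 (by omega)
    calc c' - a0 ≡ c' - (c' - j') [ZMOD m] := (Int.ModEq.refl _).sub ha0m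
      _ = j' := by ring
  have hcb0 : (c' - b0) % m = m - 1 - j' := by
    refine pvEmod_eq hm _ ?_ (by omega) (by omega)
    calc c' - b0 ≡ c' - (c' + 1 + j') [ZMOD m] := (Int.ModEq.refl _).sub hb0m
      _ = -1 - j' := by ring
      _ ≡ m - 1 - j' [ZMOD m] := Int.modEq_iff_dvd.mpr ⟨1, by ring⟩
  refine ⟨min a0 b0, max a0 b0, by omega, by omega, by omega, ?_, ?_⟩
  · rw [hsum _ _ rfl rfl, hcolor]
  · rw [hsum _ _ rfl rfl]
    rcases le_or_gt a0 b0 with h | h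
    · have e1 : min a0 b0 = a0 := min_eq_left h
      have e2 : max a0 b0 = b0 := max_eq_right h
      rw [e1, e2, hcolor, hca0, hcb0]; omega
    · have e1 : min a0 b0 = b0 := min_eq_right (le_of_lt h)
      have e2 : max a0 b0 = a0 := max_eq_left (le_of_lt h)
      rw [e1, e2, hcolor, hcb0, hca0]; omega

-- nested 'for a: for b:' loop as a single fold over the edge list
theorem pvFoldl_nested {gamma : Type} (l : List Int) (g : Int → List Int)
    (f : gamma → Int → Int → gamma) (init : gamma) :
    l.foldl (fun acc a => (g a).foldl (fun acc b => f acc a b) acc) init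
      = (l.flatMap (fun a => (g a).map (fun b => (a, b)))).foldl
          (fun acc x => f acc x.1 x.2) init := by
  induction l generalizing init with
  | nil => rfl
  | cons a l ih => simp only [List.foldl_cons, List.flatMap_cons, List.foldl_append,
      List.foldl_map, ih]

def pvGE (m c j : Int) : Int × Int := ((c - j) % m, (c + 1 + j) % m)

theorem pvAt_eq (T : List (List (Int × Int))) (c j : Nat) (hc : c < T.length)
    (hj : j < (T[c]'hc).length) : pvAt T c j = (T[c]'hc)[j]'hj := by
  unfold pvAt
  rw [List.getD_eq_getElem _ _ hc, List.getD_eq_getElem]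

-- the edge list of the complete graph on [0,m), in loop order
def pvEdges (m : Int) : List (Int × Int) :=
  (PySem.List.pyRange 0 m).flatMap (fun a => (PySem.List.pyRange (a + 1) m).map (fun b => (a, b)))

theorem pvMem_edges {m a b : Int} : (a, b) ∈ pvEdges m ↔ 0 ≤ a ∧ a < b ∧ b < m := by
  unfold pvEdges
  simp only [List.mem_flatMap, List.mem_map, PySem.List.mem_pyRange_one]
  constructor
  · rintro ⟨a', ⟨h1, h2⟩, b', ⟨h3, h4⟩, he⟩
    obtain ⟨rfl, rfl⟩ : a' = a ∧ b' = b := by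
      refine ⟨congrArg Prod.fst he, congrArg Prod.snd he⟩
    exact ⟨h1, by omega, h4⟩
  · rintro ⟨h1, h2, h3⟩
    exact ⟨a, ⟨h1, by omega⟩, b, ⟨by omega, h3⟩, rfl⟩

-- phase 1: the edge scatter loop fills every slot below (m-1)/2 with its row value
theorem pvPhase1 (m size inv2 : Int) (hm : 0 < m) (hodd : m % 2 = 1)
    (hinv : inv2 = (m + 1) / 2) (hsize : (m - 1) / 2 ≤ size)
    (T : List (List (Int × Int))) (hT : T.length = m.toNat)
    (hTr : ∀ i (h : i < T.length), (T[i]).length = size.toNat)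
    (R : List (List (Int × Int)))
    (hR : R = (PySem.List.pyRange 0 m).foldl (fun T a =>
      (PySem.List.pyRange (a + 1) m).foldl (fun T b =>
        let c := PySem.Int.mod ((a + b - 1) * inv2) m
        let j := min (PySem.Int.mod (c - a) m) (PySem.Int.mod (c - b) m)
        let first := PySem.Int.mod (c - j) m
        pvSet2 T c j (first, if first == a then b else a)) T) T) :
    R.length = m.toNat ∧ (∀ i (h : i < R.length), (R[i]).length = size.toNat) ∧
    ∀ c j : Int, 0 ≤ c → c < m → 0 ≤ j → j < size →
      pvAt R c.toNat j.toNat = if 2 * j < m - 1 then pvGE m c j else pvAt T c.toNat j.toNat := by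
  have hs : ∀ x ∈ pvEdges m,
      0 ≤ (fun x : Int × Int => ((x.1 + x.2 - 1) * ((m + 1) / 2)) % m) x ∧ (fun x : Int × Int => ((x.1 + x.2 - 1) * ((m + 1) / 2)) % m) x < m ∧ 0 ≤ (fun x : Int × Int => (min ((((x.1 + x.2 - 1) * ((m + 1) / 2)) % m - x.1) % m) ((((x.1 + x.2 - 1) * ((m + 1) / 2)) % m - x.2) % m))) x ∧ (fun x : Int × Int => (min ((((x.1 + x.2 - 1) * ((m + 1) / 2)) % m - x.1) % m) ((((x.1 + x.2 - 1) * ((m + 1) / 2)) % m - x.2) % m))) x < size ∧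
      (fun x : Int × Int => (((((x.1 + x.2 - 1) * ((m + 1) / 2)) % m - (min ((((x.1 + x.2 - 1) * ((m + 1) / 2)) % m - x.1) % m) ((((x.1 + x.2 - 1) * ((m + 1) / 2)) % m - x.2) % m))) % m), if (((((x.1 + x.2 - 1) * ((m + 1) / 2)) % m - (min ((((x.1 + x.2 - 1) * ((m + 1) / 2)) % m - x.1) % m) ((((x.1 + x.2 - 1) * ((m + 1) / 2)) % m - x.2) % m))) % m) == x.1) then x.2 else x.1)) x = pvGE m ((fun x : Int × Int => ((x.1 + x.2 - 1) * ((m + 1) / 2)) % m) x) ((fun x : Int × Int => (min ((((x.1 + x.2 - 1) * ((m + 1) / 2)) % m - x.1) % m) ((((x.1 + x.2 - 1) * ((m + 1) / 2)) % m - x.2) % m))) x) := by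
    rintro ⟨a, b⟩ hx
    rw [pvMem_edges] at hx
    obtain ⟨e1, e2, e3, e4, e5⟩ := pvEdge m a b _ _ _ _ hm hodd hx.1 hx.2.1 hx.2.2
      rfl rfl rfl rfl
    exact ⟨e1, e2, e3, by
      show min (((a + b - 1) * ((m + 1) / 2) % m - a) % m)
          (((a + b - 1) * ((m + 1) / 2) % m - b) % m) < size
      omega, by simpa [pvGE] using e5⟩
  have hfold : R = (pvEdges m).foldl
      (fun T x => pvSet2 T ((fun x : Int × Int => ((x.1 + x.2 - 1) * ((m + 1) / 2)) % m) x) ((fun x : Int × Int => (min ((((x.1 + x.2 - 1) * ((m + 1) / 2)) % m - x.1) % m) ((((x.1 + x.2 - 1) * ((m + 1) / 2)) % m - x.2) % m))) x) ((fun x : Int × Int => (((((x.1 + x.2 - 1) * ((m + 1) / 2)) % m - (min ((((x.1 + x.2 - 1) * ((m + 1) / 2)) % m - x.1) % m) ((((x.1 + x.2 - 1) * ((m + 1) / 2)) % m - x.2) % m))) % m), if (((((x.1 + x.2 - 1) * ((m + 1) / 2)) % m - (min ((((x.1 + x.2 - 1) * ((m + 1) / 2)) % m - x.1) % m) ((((x.1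 + x.2 - 1) * ((m + 1) / 2)) % m - x.2) % m))) % m) == x.1) then x.2 else x.1)) x)) T := by
    rw [hR, pvFoldl_nested _ (fun a => PySem.List.pyRange (a + 1) m)
      (fun T a b =>
        let c := PySem.Int.mod ((a + b - 1) * inv2) m
        let j := min (PySem.Int.mod (c - a) m) (PySem.Int.mod (c - b) m)
        let first := PySem.Int.mod (c - j) m
        pvSet2 T c j (first, if first == a then b else a)) T]
    show List.foldl _ T (pvEdges m) = _
    apply PySem.List.foldl_congr_mem
    intro T' x hx
    simp only [PySem.Int.mod_eq_emod_of_pos hm, hinv]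
  obtain ⟨P1, P2, P3⟩ := pvFoldWrite m size (pvGE m) (fun x : Int × Int => ((x.1 + x.2 - 1) * ((m + 1) / 2)) % m) (fun x : Int × Int => (min ((((x.1 + x.2 - 1) * ((m + 1) / 2)) % m - x.1) % m) ((((x.1 + x.2 - 1) * ((m + 1) / 2)) % m - x.2) % m))) (fun x : Int × Int => (((((x.1 + x.2 - 1) * ((m + 1) / 2)) % m - (min ((((x.1 + x.2 - 1) * ((m + 1) / 2)) % m - x.1) % m) ((((x.1 + x.2 - 1) * ((m + 1) / 2)) % m - x.2) % m))) % m), if (((((x.1 + x.2 - 1) * ((m + 1) / 2)) % m - (min ((((x.1 + x.2 - 1) * ((m + 1) / 2)) % m - x.1) % m) ((((x.1 + x.2 - 1) * ((m + 1) / 2)) % m - x.2) % m))) % m) == x.1) then x.2 else x.1)) (pvEdges m) hs T hT hTr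
  rw [← hfold] at P1 P2 P3
  refine ⟨P1, P2, ?_⟩
  intro c j hc0 hc1 hj0 hj1
  rw [P3 c j hc0 hc1 hj0 hj1]
  by_cases hcov : 2 * j < m - 1
  · rw [if_pos hcov]
    obtain ⟨a, b, g1, g2, g3, g4, g5⟩ := pvCover m c j hm hodd hc0 hc1 hj0 hcov
    rw [if_pos ⟨(a, b), pvMem_edges.mpr ⟨g1, g2, g3⟩, g4, g5⟩]
  · rw [if_neg hcov, if_neg ?_]
    rintro ⟨⟨xa, xb⟩, hx, hsc, hsj⟩
    rw [pvMem_edges] at hx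
    obtain ⟨-, -, -, e4, -⟩ := pvEdge m xa xb _ _ _ _ hm hodd hx.1 hx.2.1 hx.2.2
      rfl rfl rfl rfl
    rw [hsj] at e4
    exact hcov e4

theorem pvB_eq_target (n : Int) : complete_graph_edge_coloring_cluster_alt n = pvTarget n := by
  rcases PySem.Int.mod_two_eq n with h | h
  · -- even n
    unfold complete_graph_edge_coloring_cluster_alt pvTarget
    rw [h]
    simp only [show ((0 : Int) == 1) = false from rfl, show ((0 : Int) == 0) = true from rfl,
      Bool.false_eq_true, if_false, if_true, if_neg (show ¬((0 : Int) = 1) by norm_num)]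
    rcases le_or_gt n 1 with hn | hn
    · rw [PySem.List.pyRange_one_eq_nil (by omega : n - 1 ≤ 0)]
      rfl
    · have hm : 0 < n - 1 := by omega
      have hev : n % 2 = 0 := by
        rw [PySem.Int.mod_eq_emod_of_pos (by norm_num)] at h; omega
      have hodd : (n - 1) % 2 = 1 := by omega
      have hT : (List.map (fun _ => List.replicate (PySem.Int.floordiv (n - 1 - 1) 2 + 1).toNat
          ((0:Int), (0:Int))) (PySem.List.pyRange 0 (n - 1))).length = (n - 1).toNat := by
        simp [PySem.List.length_pyRange_one]
      have hTr : ∀ i (hh : i < (List.map (fun _ => List.replicate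
          (PySem.Int.floordiv (n - 1 - 1) 2 + 1).toNat ((0:Int), (0:Int)))
          (PySem.List.pyRange 0 (n - 1))).length),
          ((List.map (fun _ => List.replicate (PySem.Int.floordiv (n - 1 - 1) 2 + 1).toNat
            ((0:Int), (0:Int))) (PySem.List.pyRange 0 (n - 1)))[i]).length
            = (PySem.Int.floordiv (n - 1 - 1) 2 + 1).toNat := by
        intro i hh
        simp
      have hhalf : PySem.Int.floordiv (n - 1 - 1) 2 = (n - 1 - 1) / 2 :=
        PySem.Int.floordiv_eq_ediv_of_pos (by norm_num)
      obtain ⟨P1, P2, P3⟩ := pvPhase1 (n - 1) (PySem.Int.floordiv (n - 1 - 1) 2 + 1)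
        (PySem.Int.floordiv (n - 1 + 1) 2) hm hodd
        (PySem.Int.floordiv_eq_ediv_of_pos (by norm_num)) (by rw [hhalf]; omega)
        _ hT hTr _ rfl
      obtain ⟨Q1, Q2, Q3⟩ := pvFoldWrite (n - 1) (PySem.Int.floordiv (n - 1 - 1) 2 + 1)
        (fun c _ => ((n : Int) - 1, PySem.Int.mod (c + PySem.Int.floordiv n 2) (n - 1)))
        (fun x : Int => x) (fun _ : Int => PySem.Int.floordiv (n - 1 - 1) 2)
        (fun x : Int => ((n : Int) - 1, PySem.Int.mod (x + PySem.Int.floordiv n 2) (n - 1)))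
        (PySem.List.pyRange 0 (n - 1))
        (by
          intro x hx
          rw [PySem.List.mem_pyRange_one] at hx
          refine ⟨hx.1, hx.2, ?_, ?_, rfl⟩
          · show (0 : Int) ≤ PySem.Int.floordiv (n - 1 - 1) 2
            rw [hhalf]; omega
          · show PySem.Int.floordiv (n - 1 - 1) 2 < PySem.Int.floordiv (n - 1 - 1) 2 + 1
            omega)
        _ P1 P2
      apply List.ext_getElem (by rw [Q1]; simp [PySem.List.length_pyRange_one])
      intro i hi1 hi2
      have hrowlen : (pvRowA (n - 1) ((0 : Int) + (i : Int))).length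
          = ((n - 1 - 1) / 2).toNat := by
        simp [pvRowA, PySem.List.length_pyRange_one]
      apply List.ext_getElem (by
        rw [Q2 i hi1]
        simp only [List.getElem_map, PySem.List.getElem_pyRange_one, List.length_append,
          hrowlen, List.length_singleton, hhalf]
        omega)
      intro k hk1 hk2
      have hi : (i : Int) < n - 1 := by rw [Q1] at hi1; omega
      have hk : (k : Int) < (n - 1 - 1) / 2 + 1 := by rw [Q2 i hi1, hhalf] at hk1; omega
      have hQ := Q3 (i : Int) (k : Int) (by positivity) hi (by positivity) (by rw [hhalf]; omega)
      rw [Int.toNat_natCast, Int.toNat_natCast] at hQ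
      rw [← pvAt_eq _ i k hi1 hk1]
      refine Eq.trans hQ ?_
      simp only [List.getElem_map, PySem.List.getElem_pyRange_one]
      by_cases hlast : (k : Int) = (n - 1 - 1) / 2
      · rw [if_pos ⟨(i : Int), PySem.List.mem_pyRange_one.mpr ⟨by positivity, hi⟩,
          rfl, by rw [hhalf]; omega⟩]
        rw [List.getElem_append_right (by rw [hrowlen]; omega)]
        simp [zero_add]
      · rw [if_neg (by rintro ⟨x, -, rfl, hxx⟩; rw [hhalf] at hxx; exact hlast hxx.symm)]
        have hP := P3 (i : Int) (k : Int) (by positivity) hi (by positivity) (by rw [hhalf]; omega)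
        rw [Int.toNat_natCast, Int.toNat_natCast, if_pos (by omega)] at hP
        refine Eq.trans hP ?_
        rw [List.getElem_append_left (by rw [hrowlen]; omega)]
        simp only [pvRowA, List.getElem_map, PySem.List.getElem_pyRange_one, pvGE,
          PySem.Int.mod_eq_emod_of_pos hm, zero_add]
  · -- odd n
    unfold complete_graph_edge_coloring_cluster_alt pvTarget
    rw [h]
    simp only [beq_self_eq_true, if_pos, show ((1 : Int) == 0) = false from rfl,
      Bool.false_eq_true, if_false]
    rcases le_or_gt n 0 with hn | hm
    · rw [PySem.List.pyRange_one_eq_nil hn]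
      rfl
    · have hodd : n % 2 = 1 := by
        rw [PySem.Int.mod_eq_emod_of_pos (by norm_num)] at h; omega
      rw [PySem.Int.floordiv_eq_ediv_of_pos (by norm_num : (0:Int) < 2),
          PySem.Int.floordiv_eq_ediv_of_pos (by norm_num : (0:Int) < 2)]
      have hT : (List.map (fun _ => List.replicate ((n - 1) / 2).toNat ((0:Int), (0:Int)))
          (PySem.List.pyRange 0 n)).length = n.toNat := by
        simp [PySem.List.length_pyRange_one]
      have hTr : ∀ i (hh : i < (List.map (fun _ => List.replicate ((n - 1) / 2).toNat
          ((0:Int), (0:Int))) (PySem.List.pyRange 0 n)).length),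
          ((List.map (fun _ => List.replicate ((n - 1) / 2).toNat ((0:Int), (0:Int)))
            (PySem.List.pyRange 0 n))[i]).length = ((n - 1) / 2).toNat := by
        intro i hh
        simp
      obtain ⟨P1, P2, P3⟩ := pvPhase1 n ((n - 1) / 2) ((n + 1) / 2) hm hodd rfl le_rfl
        _ hT hTr _ rfl
      apply List.ext_getElem (by rw [P1]; simp [PySem.List.length_pyRange_one])
      intro i hi1 hi2
      apply List.ext_getElem (by
        rw [P2 i hi1]
        simp [pvRowA, PySem.List.length_pyRange_one])
      intro k hk1 hk2
      have hi : (i : Int) < n := by rw [P1] at hi1; omega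
      have hk : (k : Int) < (n - 1) / 2 := by rw [P2 i hi1] at hk1; omega
      have hP := P3 (i : Int) (k : Int) (by positivity) hi (by positivity) hk
      rw [Int.toNat_natCast, Int.toNat_natCast, if_pos (by omega)] at hP
      rw [← pvAt_eq _ i k hi1 hk1, hP]
      simp only [List.getElem_map, PySem.List.getElem_pyRange_one, pvRowA,
        pvGE, PySem.Int.mod_eq_emod_of_pos hm, zero_add]

-- ===== VERDICT (by name: the statement is the Claim_ definition above) =====
theorem complete_graph_edge_coloring_cluster_spec : Claim_equal_complete_graph_edge_coloring_cluster := by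
  intro n _
  unfold Spec_complete_graph_edge_coloring_cluster
  rw [pvA_eq_target, pvB_eq_target]
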